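-- pv_equiv track=rewrite | github.com/Syps/aisu_circles | position.py | extend_positions
-- ===== SOURCE A (Python) =====
-- from typing import List, Tuple
--
-- def extend_positions(positions, repeats) -> List:
--     extended_positions = positions[:]
--     for repeat in range(repeats - 1):
--         if repeat % 2 == 0:
--             repeat_positions = reversed(positions)
--         else:
--             repeat_positions = positions
--         extended_positions.extend(repeat_positions)
--
--     return extended_positions
-- ===== SOURCE B (Python) =====
-- def extend_positions(positions, repeats):
--     fwd = positions[:]
--     rev = positions[::-1]
--     m = max(repeats, 1)
--     return (fwd + rev) * (m // 2) + (fwd if m % 2 else [])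
-- ===== Notes on version B (the rewrite author's own statement) =====
-- stated objective: simpler
-- what changed: Replaces the per-repeat alternating extend loop by a closed-form construction: replicate the period (forward+reversed) m//2 times and append one forward copy when m is odd.
import Mathlib
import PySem

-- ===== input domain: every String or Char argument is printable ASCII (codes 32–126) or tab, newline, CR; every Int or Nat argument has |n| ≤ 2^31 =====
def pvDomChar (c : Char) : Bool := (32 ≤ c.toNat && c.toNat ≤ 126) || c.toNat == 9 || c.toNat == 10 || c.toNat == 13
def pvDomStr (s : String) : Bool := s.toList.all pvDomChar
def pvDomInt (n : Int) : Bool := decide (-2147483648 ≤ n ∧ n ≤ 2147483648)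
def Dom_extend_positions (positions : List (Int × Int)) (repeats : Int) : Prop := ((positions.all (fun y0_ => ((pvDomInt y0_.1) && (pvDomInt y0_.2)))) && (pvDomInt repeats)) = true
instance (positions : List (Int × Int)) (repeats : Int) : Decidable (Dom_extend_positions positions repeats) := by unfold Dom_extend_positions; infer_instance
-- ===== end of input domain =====

-- B replaces the per-repeat alternating extend loop by a closed form: replicate the
-- period (forward ++ reversed) m//2 times and append one forward copy when m is odd
-- (m = max(repeats, 1)); same cost, simpler (objective: simpler).

-- ===== PORT A =====
-- loop 'for repeat in range(repeats - 1): extended.extend(reversed/forward)'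
def extend_positions (positions : List (Int × Int)) (repeats : Int) : List (Int × Int) :=
  (PySem.List.pyRange 0 (repeats - 1) 1).foldl
    (fun acc r =>
      acc ++ (if PySem.Int.mod r 2 = 0 then positions.reverse else positions))
    positions

-- ===== PORT B =====
def extend_positions_alt (positions : List (Int × Int)) (repeats : Int) : List (Int × Int) :=
  let fwd := positions
  let rev := positions.reverse
  let m := max repeats 1
  (List.replicate (PySem.Int.floordiv m 2).toNat (fwd ++ rev)).flatten
    ++ (if PySem.Int.mod m 2 ≠ 0 then fwd else [])

-- ===== PRECONDITION & SPEC =====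
def Spec_extend_positions (positions : List (Int × Int)) (repeats : Int) (out : List (Int × Int)) : Prop := out = extend_positions_alt positions repeats
instance (positions : List (Int × Int)) (repeats : Int) (out : List (Int × Int)) : Decidable (Spec_extend_positions positions repeats out) := by unfold Spec_extend_positions; infer_instance

-- ===== CLAIM (what is proved, stated in full; the proofs are below) =====
def Claim_equal_extend_positions : Prop := ∀ (positions : List (Int × Int)) (repeats : Int), Dom_extend_positions positions repeats → Spec_extend_positions positions repeats (extend_positions positions repeats)

-- ===== LEMMAS AND PROOFS =====

-- A's loop over n chunk indices equals B's closed form at m = n + 1.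
theorem ep_loop_closed (p : List (Int × Int)) (n : Nat) :
    (List.range n).foldl
        (fun acc k => acc ++ (if k % 2 = 0 then p.reverse else p)) p
      = (List.replicate ((n + 1) / 2) (p ++ p.reverse)).flatten
          ++ (if (n + 1) % 2 ≠ 0 then p else []) := by
  induction n with
  | zero => simp
  | succ n ih =>
    rw [List.range_succ, List.foldl_append, ih]
    rcases Nat.even_or_odd n with h | h
    · have h0 : n % 2 = 0 := Nat.even_iff.mp h
      have h1 : (n + 1) / 2 = n / 2 := by omega
      have h2 : (n + 1 + 1) / 2 = n / 2 + 1 := by omega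
      have h3 : (n + 1) % 2 ≠ 0 := by omega
      have h4 : ¬ ((n + 1 + 1) % 2 ≠ 0) := by omega
      simp only [List.foldl_cons, List.foldl_nil, h0, h1, h2,
        if_pos h3, if_neg h4, List.replicate_succ', List.flatten_append]
      simp [List.append_assoc]
    · have h0 : n % 2 = 1 := Nat.odd_iff.mp h
      have h1 : (n + 1 + 1) / 2 = (n + 1) / 2 := by omega
      have h3 : ¬ ((n + 1) % 2 ≠ 0) := by omega
      have h4 : (n + 1 + 1) % 2 ≠ 0 := by omega
      simp only [List.foldl_cons, List.foldl_nil, h0]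
      simp only [h1, if_neg h3, if_pos h4]
      simp

-- ===== VERDICT (by name: the statement is the Claim_ definition above) =====

theorem extend_positions_spec : Claim_equal_extend_positions := by
  unfold Claim_equal_extend_positions
  intro p repeats _
  unfold Spec_extend_positions extend_positions extend_positions_alt
  set n : Nat := (repeats - 1 - 0).toNat with hn
  have hmax : max repeats 1 = (n : Int) + 1 := by
    simp only [hn]; omega
  -- rewrite A's Int-indexed fold into a Nat-indexed fold over List.range n
  rw [PySem.List.pyRange_one, List.foldl_map]
  have hfun : (fun (acc : List (Int × Int)) (k : Nat) =>
        acc ++ (if PySem.Int.mod ((0 : Int) + (k : Int)) 2 = 0 then p.reverse else p))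
      = (fun acc k => acc ++ (if k % 2 = 0 then p.reverse else p)) := by
    funext acc k
    have hc : PySem.Int.mod ((0 : Int) + (k : Int)) 2 = 0 ↔ k % 2 = 0 := by
      rw [PySem.Int.mod_eq_emod_of_pos (by norm_num)]; omega
    rw [if_congr hc rfl rfl]
  rw [hfun, ep_loop_closed]
  -- B's Int arithmetic at m = n + 1
  have hfd : (PySem.Int.floordiv (max repeats 1) 2).toNat = (n + 1) / 2 := by
    rw [hmax, PySem.Int.floordiv_eq_ediv_of_pos (by norm_num)]; omega
  have hmd : (PySem.Int.mod (max repeats 1) 2 ≠ 0) ↔ ((n + 1) % 2 ≠ 0) := by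
    rw [hmax, PySem.Int.mod_eq_emod_of_pos (by norm_num)]; omega
  simp only [hfd]
  rw [if_congr hmd rfl rfl]
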